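-- pv_equiv track=rewrite | github.com/ytlzq0228/GPSd_WebDashboard | gpsdwebdash.py | get_constellation
-- ===== SOURCE A (Python) =====
-- def get_constellation(prn):
-- 	# 定义PRN号与星座的对应关系
-- 	constellation_map = {
-- 		'GPS': range(1, 32),  # GPS uses PRNs from 1 to 32
-- 		'GPS SBAS': range(33, 64),
-- 		'GL': range(65, 97),  # GLONASS uses PRNs from 33 to 65
-- 		'GA': range(301, 337),  # Galileo uses PRNs from 301 to 336
-- 		'BD': range(401, 420),  # BeiDou uses PRNs from 201 to 236
-- 		'QZSS': range(193, 198),  # QZSS uses PRNs from 193 to 197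
-- 		'IRNSS': range(401, 408),  # IRNSS uses PRNs from 401 to 407
-- 		'WAAS': range(133, 139),  # WAAS (North America) uses PRNs from 133 to 138
-- 		'EGNOS': range(120, 139),  # EGNOS (Europe) uses PRNs from 120 to 138
-- 		'GAGAN': range(127, 129),  # GAGAN (India) uses PRNs 127 and 128
-- 		'MSAS': range(129, 138)  # MSAS (Japan) uses PRNs from 129 to 137
-- 	}
--
-- 	# 遍历字典，找到相应的星座
-- 	for constellation, prns in constellation_map.items():
-- 		if prn in prns:
-- 			return f"{constellation}_{prn}"
-- 	return f"Unknow_{prn}"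
-- ===== SOURCE B (Python) =====
-- # Flat PRN->name lookup table built once (first match wins), then O(1) dict lookup per call.
-- _CONSTELLATION_RANGES = [
--     ('GPS', range(1, 32)),
--     ('GPS SBAS', range(33, 64)),
--     ('GL', range(65, 97)),
--     ('GA', range(301, 337)),
--     ('BD', range(401, 420)),
--     ('QZSS', range(193, 198)),
--     ('IRNSS', range(401, 408)),
--     ('WAAS', range(133, 139)),
--     ('EGNOS', range(120, 139)),
--     ('GAGAN', range(127, 129)),
--     ('MSAS', range(129, 138)),
-- ]
--
-- _TABLE = {}
-- for _name, _prns in _CONSTELLATION_RANGES: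
--     for _p in _prns:
--         _TABLE.setdefault(_p, _name)
--
-- def get_constellation(prn):
--     name = _TABLE.get(prn)
--     return f"{name}_{prn}" if name is not None else f"Unknow_{prn}"
-- ===== Notes on version B (the rewrite author's own statement) =====
-- stated objective: alternative
-- what changed: B precomputes, once at module load, a flat dict mapping each PRN to its constellation name (first writer wins, preserving A's priority on overlapping ranges), so each call is a single dict lookup instead of A's rebuilding the constellation map and scanning the ranges in order.
import Mathlib
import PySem

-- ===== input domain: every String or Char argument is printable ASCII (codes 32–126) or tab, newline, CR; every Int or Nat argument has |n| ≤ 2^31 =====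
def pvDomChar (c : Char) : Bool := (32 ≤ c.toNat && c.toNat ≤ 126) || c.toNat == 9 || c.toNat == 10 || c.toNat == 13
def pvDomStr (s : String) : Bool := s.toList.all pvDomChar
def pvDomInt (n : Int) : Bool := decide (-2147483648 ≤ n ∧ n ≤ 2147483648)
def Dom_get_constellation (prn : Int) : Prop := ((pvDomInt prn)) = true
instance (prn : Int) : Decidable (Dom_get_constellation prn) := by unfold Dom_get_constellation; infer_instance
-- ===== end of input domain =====

-- B replaces A's per-call scan over the constellation ranges by a flat PRN→name table
-- built once (first writer wins, preserving A's priority order) and a single dict lookup.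

-- ===== PORT A =====
-- the dict literal of A, in insertion order (name, range(a, b))
def gcMap : List (String × List Int) :=
  [ ("GPS",      PySem.List.pyRange 1 32 1)
  , ("GPS SBAS", PySem.List.pyRange 33 64 1)
  , ("GL",       PySem.List.pyRange 65 97 1)
  , ("GA",       PySem.List.pyRange 301 337 1)
  , ("BD",       PySem.List.pyRange 401 420 1)
  , ("QZSS",     PySem.List.pyRange 193 198 1)
  , ("IRNSS",    PySem.List.pyRange 401 408 1)
  , ("WAAS",     PySem.List.pyRange 133 139 1)
  , ("EGNOS",    PySem.List.pyRange 120 139 1)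
  , ("GAGAN",    PySem.List.pyRange 127 129 1)
  , ("MSAS",     PySem.List.pyRange 129 138 1) ]

-- A's loop: first (name, prns) with prn ∈ prns returns f"{name}_{prn}"
def gcLoop (prn : Int) : List (String × List Int) → Option String
  | [] => none
  | (name, prns) :: rest =>
      if prn ∈ prns then some (name ++ "_" ++ PySem.Int.toStr prn) else gcLoop prn rest

def get_constellation (prn : Int) : String :=
  match gcLoop prn gcMap with
  | some s => s
  | none => "Unknow_" ++ PySem.Int.toStr prn

-- ===== PORT B =====
-- the flat table: for each (name, prns) in order, table.setdefault(p, name) for p in prns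
def gcTable : PySem.Dict Int String :=
  gcMap.foldl (fun t p => p.2.foldl (fun d q => d.setdefault q p.1) t) PySem.Dict.empty

def get_constellation_alt (prn : Int) : String :=
  match gcTable.get? prn with
  | some name => name ++ "_" ++ PySem.Int.toStr prn
  | none => "Unknow_" ++ PySem.Int.toStr prn

-- ===== PRECONDITION & SPEC =====
def Spec_get_constellation (prn : Int) (out : String) : Prop := out = get_constellation_alt prn
instance (prn : Int) (out : String) : Decidable (Spec_get_constellation prn out) := by unfold Spec_get_constellation; infer_instance

-- ===== CLAIM (what is proved, stated in full; the proofs are below) =====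
def Claim_equal_get_constellation : Prop := ∀ (prn : Int), Dom_get_constellation prn → Spec_get_constellation prn (get_constellation prn)

-- ===== LEMMAS AND PROOFS =====

-- lookup after a setdefault-fold over range(a, b): filled exactly on the fresh keys of [a, b)
theorem fold_setdefault_get? (t : PySem.Dict Int String) (name : String) (a b x : Int) :
    ((PySem.List.pyRange a b 1).foldl (fun d q => d.setdefault q name) t).get? x =
      if a ≤ x ∧ x < b ∧ (t.get? x) = none then some name else t.get? x := by
  by_cases hab : b ≤ a
  · rw [PySem.List.pyRange_one_eq_nil hab]
    simp only [List.foldl_nil]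
    rw [if_neg]; rintro ⟨h1, h2, _⟩; omega
  · rw [PySem.List.pyRange_one_cons (by omega)]
    simp only [List.foldl_cons]
    rw [fold_setdefault_get? (t.setdefault a name) name (a + 1) b x]
    by_cases hc : t.contains a
    · rw [PySem.Dict.setdefault_of_contains _ _ hc]
      by_cases hx : x = a
      · subst hx
        have hg : t.get? x ≠ none := by
          intro h
          rw [PySem.Dict.get?_eq_none_iff_contains] at h
          simp [hc] at h
        rw [if_neg (fun h => hg h.2.2), if_neg (fun h => hg h.2.2)]
      · by_cases hg : t.get? x = none
        · simp only [hg, and_true]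
          split_ifs <;> first | rfl | omega
        · rw [if_neg (fun h => hg h.2.2), if_neg (fun h => hg h.2.2)]
    · rw [PySem.Dict.setdefault_of_not_contains _ _ (by simpa using hc)]
      by_cases hx : x = a
      · subst hx
        rw [PySem.Dict.get?_insert_self]
        have hn : t.get? x = none := by
          rw [PySem.Dict.get?_eq_none_iff_contains]; simpa using hc
        rw [if_neg (by omega), if_pos ⟨le_refl x, by omega, hn⟩]
      · rw [PySem.Dict.get?_insert_of_ne _ _ hx]
        by_cases hg : t.get? x = none
        · simp only [hg, and_true]
          split_ifs <;> first | rfl | omega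
        · rw [if_neg (fun h => hg h.2.2), if_neg (fun h => hg h.2.2)]
termination_by (b - a).toNat
decreasing_by omega

-- the table, characterized as interval tests in priority order
-- setdefault over a range fills exactly the still-missing keys of [a, b)
theorem fold_setdefault_get?' (t : PySem.Dict Int String) (name : String) (a b x : Int) :
    ((PySem.List.pyRange a b 1).foldl (fun d q => d.setdefault q name) t).get? x =
      match t.get? x with
      | some v => some v
      | none => if a ≤ x ∧ x < b then some name else none := by
  rw [fold_setdefault_get?]
  cases h : t.get? x with
  | some v => rw [if_neg (by simp)]
  | none =>
      split_ifs with h1 h2 h2 <;> first | rfl | omega | (exact absurd ⟨h2.1, h2.2, rfl⟩ h1)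

theorem gcT0 (x : Int) : (PySem.Dict.empty : PySem.Dict Int String).get? x = none := PySem.Dict.get?_empty _

set_option maxHeartbeats 1000000 in
theorem gcT1 (x : Int) : (((PySem.List.pyRange 1 32 1).foldl (fun d q => PySem.Dict.setdefault d q "GPS") PySem.Dict.empty)).get? x = (if 1 ≤ x ∧ x < 32 then some "GPS" else none) := by
  rw [fold_setdefault_get?', gcT0]

set_option maxHeartbeats 1000000 in
theorem gcT2 (x : Int) : (((PySem.List.pyRange 33 64 1).foldl (fun d q => PySem.Dict.setdefault d q "GPS SBAS") ((PySem.List.pyRange 1 32 1).foldl (fun d q => PySem.Dict.setdefault d q "GPS") PySem.Dict.empty))).get? x = (if 1 ≤ x ∧ x < 32 then some "GPS" else (if 33 ≤ x ∧ x < 64 then some "GPS SBAS" else none)) := by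
  rw [fold_setdefault_get?', gcT1]
  split_ifs <;> rfl

set_option maxHeartbeats 1000000 in
theorem gcT3 (x : Int) : (((PySem.List.pyRange 65 97 1).foldl (fun d q => PySem.Dict.setdefault d q "GL") ((PySem.List.pyRange 33 64 1).foldl (fun d q => PySem.Dict.setdefault d q "GPS SBAS") ((PySem.List.pyRange 1 32 1).foldl (fun d q => PySem.Dict.setdefault d q "GPS") PySem.Dict.empty)))).get? x = (if 1 ≤ x ∧ x < 32 then some "GPS" else (if 33 ≤ x ∧ x < 64 then some "GPS SBAS" else (if 65 ≤ x ∧ x < 97 then some "GL" else none))) := by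
  rw [fold_setdefault_get?', gcT2]
  split_ifs <;> rfl

set_option maxHeartbeats 1000000 in
theorem gcT4 (x : Int) : (((PySem.List.pyRange 301 337 1).foldl (fun d q => PySem.Dict.setdefault d q "GA") ((PySem.List.pyRange 65 97 1).foldl (fun d q => PySem.Dict.setdefault d q "GL") ((PySem.List.pyRange 33 64 1).foldl (fun d q => PySem.Dict.setdefault d q "GPS SBAS") ((PySem.List.pyRange 1 32 1).foldl (fun d q => PySem.Dict.setdefault d q "GPS") PySem.Dict.empty))))).get? x = (if 1 ≤ x ∧ x < 32 then some "GPS" else (if 33 ≤ x ∧ x < 64 then some "GPS SBAS" else (if 65 ≤ x ∧ x < 97 then some "GL" else (if 301 ≤ x ∧ x < 337 then some "GA" else none)))) := by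
  rw [fold_setdefault_get?', gcT3]
  split_ifs <;> rfl

set_option maxHeartbeats 1000000 in
theorem gcT5 (x : Int) : (((PySem.List.pyRange 401 420 1).foldl (fun d q => PySem.Dict.setdefault d q "BD") ((PySem.List.pyRange 301 337 1).foldl (fun d q => PySem.Dict.setdefault d q "GA") ((PySem.List.pyRange 65 97 1).foldl (fun d q => PySem.Dict.setdefault d q "GL") ((PySem.List.pyRange 33 64 1).foldl (fun d q => PySem.Dict.setdefault d q "GPS SBAS") ((PySem.List.pyRange 1 32 1).foldl (fun d q => PySem.Dict.setdefault d q "GPS") PySem.Dict.empty)))))).get? x = (if 1 ≤ x ∧ x < 32 then some "GPS" else (if 33 ≤ x ∧ x < 64 then some "GPS SBAS" else (if 65 ≤ x ∧ x < 97 then some "GL" else (if 301 ≤ x ∧ x < 337 then some "GA" else (if 401 ≤ x ∧ x < 420 then some "BD" else none))))) := by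
  rw [fold_setdefault_get?', gcT4]
  split_ifs <;> rfl

set_option maxHeartbeats 1000000 in
theorem gcT6 (x : Int) : (((PySem.List.pyRange 193 198 1).foldl (fun d q => PySem.Dict.setdefault d q "QZSS") ((PySem.List.pyRange 401 420 1).foldl (fun d q => PySem.Dict.setdefault d q "BD") ((PySem.List.pyRange 301 337 1).foldl (fun d q => PySem.Dict.setdefault d q "GA") ((PySem.List.pyRange 65 97 1).foldl (fun d q => PySem.Dict.setdefault d q "GL") ((PySem.List.pyRange 33 64 1).foldl (fun d q => PySem.Dict.setdefault d q "GPS SBAS") ((PySem.List.pyRange 1 32 1).foldl (fun d q => PySem.Dict.setdefault d q "GPS") PySem.Dict.empty))))))).get? x = (if 1 ≤ x ∧ x < 32 then some "GPS" else (if 33 ≤ x ∧ x < 64 then some "GPS SBAS" else (if 65 ≤ x ∧ x < 97 then some "GL" else (if 301 ≤ x ∧ x < 337 then some "GA" else (if 401 ≤ x ∧ x < 420 then some "BD" else (if 193 ≤ x ∧ x < 198 then some "QZSS" else none)))))) := by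
  rw [fold_setdefault_get?', gcT5]
  split_ifs <;> rfl

set_option maxHeartbeats 1000000 in
theorem gcT7 (x : Int) : (((PySem.List.pyRange 401 408 1).foldl (fun d q => PySem.Dict.setdefault d q "IRNSS") ((PySem.List.pyRange 193 198 1).foldl (fun d q => PySem.Dict.setdefault d q "QZSS") ((PySem.List.pyRange 401 420 1).foldl (fun d q => PySem.Dict.setdefault d q "BD") ((PySem.List.pyRange 301 337 1).foldl (fun d q => PySem.Dict.setdefault d q "GA") ((PySem.List.pyRange 65 97 1).foldl (fun d q => PySem.Dict.setdefault d q "GL") ((PySem.List.pyRange 33 64 1).foldl (fun d q => PySem.Dict.setdefault d q "GPS SBAS") ((PySem.List.pyRange 1 32 1).foldl (fun d q => PySem.Dict.setdefault d q "GPS") PySem.Dict.empty)))))))).get? x = (if 1 ≤ x ∧ x < 32 then some "GPS" else (if 33 ≤ x ∧ x < 64 then some "GPS SBAS" else (if 65 ≤ x ∧ x < 97 then some "GL" else (if 301 ≤ x ∧ x < 337 then some "GA" else (if 401 ≤ x ∧ x < 420 then some "BD" else (if 193 ≤ x ∧ x < 198 then some "QZSS" else (if 401 ≤ x ∧ x <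 408 then some "IRNSS" else none))))))) := by
  rw [fold_setdefault_get?', gcT6]
  split_ifs <;> rfl

set_option maxHeartbeats 1000000 in
theorem gcT8 (x : Int) : (((PySem.List.pyRange 133 139 1).foldl (fun d q => PySem.Dict.setdefault d q "WAAS") ((PySem.List.pyRange 401 408 1).foldl (fun d q => PySem.Dict.setdefault d q "IRNSS") ((PySem.List.pyRange 193 198 1).foldl (fun d q => PySem.Dict.setdefault d q "QZSS") ((PySem.List.pyRange 401 420 1).foldl (fun d q => PySem.Dict.setdefault d q "BD") ((PySem.List.pyRange 301 337 1).foldl (fun d q => PySem.Dict.setdefault d q "GA") ((PySem.List.pyRange 65 97 1).foldl (fun d q => PySem.Dict.setdefault d q "GL") ((PySem.List.pyRange 33 64 1).foldl (fun d q => PySem.Dict.setdefault d q "GPS SBAS") ((PySem.List.pyRange 1 32 1).foldl (fun d q => PySem.Dict.setdefault d q "GPS") PySem.Dict.empty))))))))).get? x = (if 1 ≤ x ∧ x < 32 then some "GPS" else (if 33 ≤ x ∧ x < 64 then some "GPS SBAS" else (if 65 ≤ x ∧ x < 97 then some "GL" else (if 301 ≤ x ∧ x < 337 then some "GA" else (if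 401 ≤ x ∧ x < 420 then some "BD" else (if 193 ≤ x ∧ x < 198 then some "QZSS" else (if 401 ≤ x ∧ x < 408 then some "IRNSS" else (if 133 ≤ x ∧ x < 139 then some "WAAS" else none)))))))) := by
  rw [fold_setdefault_get?', gcT7]
  split_ifs <;> rfl

set_option maxHeartbeats 1000000 in
theorem gcT9 (x : Int) : (((PySem.List.pyRange 120 139 1).foldl (fun d q => PySem.Dict.setdefault d q "EGNOS") ((PySem.List.pyRange 133 139 1).foldl (fun d q => PySem.Dict.setdefault d q "WAAS") ((PySem.List.pyRange 401 408 1).foldl (fun d q => PySem.Dict.setdefault d q "IRNSS") ((PySem.List.pyRange 193 198 1).foldl (fun d q => PySem.Dict.setdefault d q "QZSS") ((PySem.List.pyRange 401 420 1).foldl (fun d q => PySem.Dict.setdefault d q "BD") ((PySem.List.pyRange 301 337 1).foldl (fun d q => PySem.Dict.setdefault d q "GA") ((PySem.List.pyRange 65 97 1).foldl (fun d q => PySem.Dict.setdefault d q "GL") ((PySem.List.pyRange 33 64 1).foldl (fun d q => PySem.Dict.setdefault d q "GPS SBAS") ((PySem.List.pyRange 1 32 1).foldl (fun d q => PySem.Dict.setdefault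 d q "GPS") PySem.Dict.empty)))))))))).get? x = (if 1 ≤ x ∧ x < 32 then some "GPS" else (if 33 ≤ x ∧ x < 64 then some "GPS SBAS" else (if 65 ≤ x ∧ x < 97 then some "GL" else (if 301 ≤ x ∧ x < 337 then some "GA" else (if 401 ≤ x ∧ x < 420 then some "BD" else (if 193 ≤ x ∧ x < 198 then some "QZSS" else (if 401 ≤ x ∧ x < 408 then some "IRNSS" else (if 133 ≤ x ∧ x < 139 then some "WAAS" else (if 120 ≤ x ∧ x < 139 then some "EGNOS" else none))))))))) := by
  rw [fold_setdefault_get?', gcT8]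
  split_ifs <;> rfl

set_option maxHeartbeats 1000000 in
theorem gcT10 (x : Int) : (((PySem.List.pyRange 127 129 1).foldl (fun d q => PySem.Dict.setdefault d q "GAGAN") ((PySem.List.pyRange 120 139 1).foldl (fun d q => PySem.Dict.setdefault d q "EGNOS") ((PySem.List.pyRange 133 139 1).foldl (fun d q => PySem.Dict.setdefault d q "WAAS") ((PySem.List.pyRange 401 408 1).foldl (fun d q => PySem.Dict.setdefault d q "IRNSS") ((PySem.List.pyRange 193 198 1).foldl (fun d q => PySem.Dict.setdefault d q "QZSS") ((PySem.List.pyRange 401 420 1).foldl (fun d q => PySem.Dict.setdefault d q "BD") ((PySem.List.pyRange 301 337 1).foldl (fun d q => PySem.Dict.setdefault d q "GA") ((PySem.List.pyRange 65 97 1).foldl (fun d q => PySem.Dict.setdefault d q "GL") ((PySem.List.pyRange 33 64 1).foldl (fun d q => PySem.Dict.setdefault d q "GPS SBAS") ((PySem.List.pyRange 1 32 1).foldl (fun d q => PySem.Dict.setdefault d q "GPS") PySem.Dict.empty))))))))))).get? x = (if 1 ≤ x ∧ x < 32 then some "GPS" else (if 33 ≤ x ∧ x < 64 then some "GPS SBAS"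 else (if 65 ≤ x ∧ x < 97 then some "GL" else (if 301 ≤ x ∧ x < 337 then some "GA" else (if 401 ≤ x ∧ x < 420 then some "BD" else (if 193 ≤ x ∧ x < 198 then some "QZSS" else (if 401 ≤ x ∧ x < 408 then some "IRNSS" else (if 133 ≤ x ∧ x < 139 then some "WAAS" else (if 120 ≤ x ∧ x < 139 then some "EGNOS" else (if 127 ≤ x ∧ x < 129 then some "GAGAN" else none)))))))))) := by
  rw [fold_setdefault_get?', gcT9]
  split_ifs <;> rfl

set_option maxHeartbeats 1000000 in
theorem gcT11 (x : Int) : (((PySem.List.pyRange 129 138 1).foldl (fun d q => PySem.Dict.setdefault d q "MSAS") ((PySem.List.pyRange 127 129 1).foldl (fun d q => PySem.Dict.setdefault d q "GAGAN") ((PySem.List.pyRange 120 139 1).foldl (fun d q => PySem.Dict.setdefault d q "EGNOS") ((PySem.List.pyRange 133 139 1).foldl (fun d q => PySem.Dict.setdefault d q "WAAS") ((PySem.List.pyRange 401 408 1).foldl (fun d q => PySem.Dict.setdefault d q "IRNSS") ((PySem.List.pyRange 193 198 1).foldl (fun d q => PySem.Dict.setdefault d q "QZSS") ((PySem.List.pyRange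 401 420 1).foldl (fun d q => PySem.Dict.setdefault d q "BD") ((PySem.List.pyRange 301 337 1).foldl (fun d q => PySem.Dict.setdefault d q "GA") ((PySem.List.pyRange 65 97 1).foldl (fun d q => PySem.Dict.setdefault d q "GL") ((PySem.List.pyRange 33 64 1).foldl (fun d q => PySem.Dict.setdefault d q "GPS SBAS") ((PySem.List.pyRange 1 32 1).foldl (fun d q => PySem.Dict.setdefault d q "GPS") PySem.Dict.empty)))))))))))).get? x = (if 1 ≤ x ∧ x < 32 then some "GPS" else (if 33 ≤ x ∧ x < 64 then some "GPS SBAS" else (if 65 ≤ x ∧ x < 97 then some "GL" else (if 301 ≤ x ∧ x < 337 then some "GA" else (if 401 ≤ x ∧ x < 420 then some "BD" else (if 193 ≤ x ∧ x < 198 then some "QZSS" else (if 401 ≤ x ∧ x < 408 then some "IRNSS" else (if 133 ≤ x ∧ x < 139 then some "WAAS" else (if 120 ≤ x ∧ x < 139 then some "EGNOS" else (if 127 ≤ x ∧ x < 129 then some "GAGAN" else (if 129 ≤ x ∧ x < 138 then some "MSAS" else none))))))))))) := by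
  rw [fold_setdefault_get?', gcT10]
  split_ifs <;> rfl

set_option maxHeartbeats 1000000 in
theorem gcTable_get? (x : Int) :
    gcTable.get? x =
      if 1 ≤ x ∧ x < 32 then some "GPS"
      else if 33 ≤ x ∧ x < 64 then some "GPS SBAS"
      else if 65 ≤ x ∧ x < 97 then some "GL"
      else if 301 ≤ x ∧ x < 337 then some "GA"
      else if 401 ≤ x ∧ x < 420 then some "BD"
      else if 193 ≤ x ∧ x < 198 then some "QZSS"
      else if 133 ≤ x ∧ x < 139 then some "WAAS"
      else if 120 ≤ x ∧ x < 139 then some "EGNOS"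
      else none := by
  unfold gcTable
  simp only [gcMap, List.foldl_cons, List.foldl_nil]
  rw [gcT11]
  split_ifs <;> first | rfl | omega

-- ===== VERDICT (by name: the statement is the Claim_ definition above) =====
set_option maxHeartbeats 2000000 in
theorem get_constellation_spec : Claim_equal_get_constellation := by
  intro prn _
  show get_constellation prn = get_constellation_alt prn
  unfold get_constellation get_constellation_alt
  rw [gcTable_get?]
  simp only [gcMap, gcLoop, PySem.List.mem_pyRange_one]
  split_ifs <;> first | rfl | omega
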